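-- pv_equiv track=rewrite | github.com/sangajapatel06/CS351-Cloud-Computing-Lab | Lab1/CloudLab-1.py | firstRepeatingEle
-- ===== SOURCE A (Python) =====
-- from typing import List
--
-- def firstRepeatingEle(numList: List[int]) -> set():  # Problem 7
--     """Returns the first repeating element from the given list numList.
--
--     doctests:
--     >>> firstRepeatingEle([1, 2, 3, 4, 5, 1, 2])
--     {1}
--     >>> firstRepeatingEle([1, 2, 5, 4, 5, 1])
--     {5}
--     """
--     min = 10000000
--     repeatingSet = set([0])
--     for i in range(len(numList)):
--         for j in range(i + 1, len(numList)):
--             if numList[i] == numList[j]: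
--                 if j - i < min:
--                     repeatingSet.pop()
--                     min = j - i
--                     repeatingSet.add(numList[i])
--
--     return repeatingSet
-- ===== SOURCE B (Python) =====
-- from typing import List
--
-- def firstRepeatingEle(numList: List[int]) -> set:
--     # Single pass: dict of last-seen index per value; the element with the
--     # smallest gap between two equal occurrences (earliest such pair wins).
--     # 10000000 is the same 'infinity' initial minimum the original uses.
--     best_gap = 10000000
--     best_val = 0
--     last = {}
--     for j, v in enumerate(numList):
--         if v in last and j - last[v] < best_gap:
--             best_gap = j - last[v]
--             best_val = v
--         last[v] = j
--     return {best_val}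
-- ===== Notes on version B (the rewrite author's own statement) =====
-- stated objective: faster
-- what changed: Replaces the all-pairs double loop with a single pass keeping a dict of each value's last-seen index and tracking the minimum consecutive-occurrence gap (same 10000000 'infinity' initial minimum as A).
import Mathlib
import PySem

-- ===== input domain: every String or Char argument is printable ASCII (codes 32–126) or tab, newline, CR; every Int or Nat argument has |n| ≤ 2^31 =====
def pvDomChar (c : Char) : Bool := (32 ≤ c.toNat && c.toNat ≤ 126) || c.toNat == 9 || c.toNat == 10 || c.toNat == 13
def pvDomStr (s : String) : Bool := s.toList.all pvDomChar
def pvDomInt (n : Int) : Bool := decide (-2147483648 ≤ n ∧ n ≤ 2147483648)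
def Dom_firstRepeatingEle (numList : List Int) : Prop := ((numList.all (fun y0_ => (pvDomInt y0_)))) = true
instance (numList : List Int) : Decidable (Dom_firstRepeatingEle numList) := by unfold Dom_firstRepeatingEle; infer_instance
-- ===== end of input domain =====

-- B replaces A's all-pairs O(n^2) scan by a single pass with a dict of last-seen
-- indices (same return value everywhere, including A's {0} sentinel and its
-- 10000000 'infinity' initial minimum).

-- ===== PORT A =====
-- Python set.pop() removes an arbitrary element; here the set holds exactly one
-- element at every pop, so 'drop 1' (remove that only element) is exact.
def firstRepeatingEle (numList : List Int) : List Int :=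
  let res := (PySem.List.pyRange 0 (PySem.List.len numList) 1).foldl (fun st i =>
      (PySem.List.pyRange (i + 1) (PySem.List.len numList) 1).foldl (fun st j =>
        if PySem.List.pyGetD numList i 0 = PySem.List.pyGetD numList j 0 then
          if j - i < st.1 then
            (j - i, PySem.Set.add (st.2.drop 1) (PySem.List.pyGetD numList i 0))
          else st
        else st) st)
    ((10000000 : Int), (PySem.Set.ofList [(0 : Int)] : PySem.Set Int))
  res.2

-- ===== PORT B =====
def firstRepeatingEle_alt (numList : List Int) : List Int :=
  let res := (PySem.List.enumerate numList 0).foldl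
    (fun st p =>
      let st1 :=
        if st.2.contains p.2 && decide (p.1 - st.2.getD p.2 0 < st.1.1) then
          ((p.1 - st.2.getD p.2 0, p.2), st.2)
        else st
      (st1.1, st1.2.insert p.2 p.1))
    (((10000000 : Int), (0 : Int)), (PySem.Dict.empty : PySem.Dict Int Int))
  PySem.Set.add PySem.Set.empty res.1.2

-- ===== PRECONDITION & SPEC =====
def Spec_firstRepeatingEle (numList : List Int) (out : List Int) : Prop := out = firstRepeatingEle_alt numList
instance (numList : List Int) (out : List Int) : Decidable (Spec_firstRepeatingEle numList out) := by unfold Spec_firstRepeatingEle; infer_instance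

-- ===== CLAIM (what is proved, stated in full; the proofs are below) =====
def Claim_equal_firstRepeatingEle : Prop := ∀ (numList : List Int), Dom_firstRepeatingEle numList → Spec_firstRepeatingEle numList (firstRepeatingEle numList)

-- ===== LEMMAS AND PROOFS =====

-- value at an index (all indices used are in range, default irrelevant)
def pvGet (l : List Int) (i : Int) : Int := PySem.List.pyGetD l i 0

-- the state-update both loops perform: keep the pair with strictly smaller gap
def pvStep (s p : Int × Int) : Int × Int := if p.1 < s.1 then p else s

-- A's candidate pairs: (gap, value) over all i < j with l[i] = l[j], i-major order
def pvBlockA (l : List Int) (i : Int) : List (Int × Int) :=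
  (PySem.List.pyRange (i + 1) (PySem.List.len l) 1).filterMap
    (fun j => if pvGet l i = pvGet l j then some (j - i, pvGet l i) else none)

def pvPairsA (l : List Int) : List (Int × Int) :=
  (PySem.List.pyRange 0 (PySem.List.len l) 1).flatMap (pvBlockA l)

-- index of the last occurrence of l[j] before j (B's dict lookup), if any
def pvPrev (l : List Int) (j : Int) : Option Int :=
  ((PySem.List.pyRange 0 j 1).filter (fun i => decide (pvGet l i = pvGet l j))).getLast?

-- B's candidate pairs: nearest-previous-occurrence pairs, j-major order
def pvBlockB (l : List Int) (j : Int) : List (Int × Int) :=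
  match pvPrev l j with
  | some i => [(j - i, pvGet l j)]
  | none => []

def pvPairsB (l : List Int) : List (Int × Int) :=
  (PySem.List.pyRange 0 (PySem.List.len l) 1).flatMap (pvBlockB l)

-- running minimum of the gaps
def pvMin (ps : List (Int × Int)) (m : Int) : Int := ps.foldl (fun a p => min a p.1) m

-- ---- generic facts about pvStep folds ----
theorem pvMin_le_init (ps : List (Int × Int)) (m : Int) : pvMin ps m ≤ m := by
  induction ps generalizing m with
  | nil => simp [pvMin]
  | cons p t ih =>
    have := ih (min m p.1)
    simp only [pvMin, List.foldl_cons] at *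
    exact this.trans (min_le_left _ _)

theorem pvMin_le_mem (ps : List (Int × Int)) (m : Int) {p : Int × Int} (hp : p ∈ ps) :
    pvMin ps m ≤ p.1 := by
  induction ps generalizing m with
  | nil => cases hp
  | cons q t ih =>
    simp only [pvMin, List.foldl_cons] at *
    rcases List.mem_cons.1 hp with h | h
    · subst h
      exact (pvMin_le_init t (min m p.1)).trans (min_le_right _ _)
    · exact ih _ h

theorem pvMin_attained (ps : List (Int × Int)) (m : Int) :
    pvMin ps m = m ∨ ∃ p ∈ ps, pvMin ps m = p.1 := by
  induction ps generalizing m with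
  | nil => left; rfl
  | cons q t ih =>
    simp only [pvMin, List.foldl_cons] at *
    rcases ih (min m q.1) with h | ⟨p, hp, h⟩
    · rcases min_cases m q.1 with ⟨he, _⟩ | ⟨he, _⟩
      · left; rw [h, he]
      · right; exact ⟨q, List.mem_cons_self, by rw [h, he]⟩
    · right; exact ⟨p, List.mem_cons_of_mem _ hp, h⟩

theorem pvStep_nofire (ps : List (Int × Int)) (m v : Int) (h : ∀ p ∈ ps, m ≤ p.1) :
    ps.foldl pvStep (m, v) = (m, v) := by
  induction ps with
  | nil => rfl
  | cons p t ih =>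
    simp only [List.foldl_cons, pvStep]
    rw [if_neg (not_lt.2 (h p List.mem_cons_self))]
    exact ih (fun q hq => h q (List.mem_cons_of_mem _ hq))

theorem pvStep_snd_char (ps : List (Int × Int)) (m v : Int) (q : Int × Int)
    (hG : pvMin ps m < m)
    (hf : ps.find? (fun p => decide (p.1 ≤ pvMin ps m)) = some q) :
    (ps.foldl pvStep (m, v)).2 = q.2 := by
  induction ps generalizing m v with
  | nil => simp [pvMin] at hG
  | cons p t ih =>
    have hmin : pvMin (p :: t) m = pvMin t (min m p.1) := rfl
    by_cases hple : p.1 ≤ pvMin (p :: t) m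
    · -- p is the found element; p.1 = G, fires, and nothing in t beats it
      rw [List.find?_cons_of_pos (by simpa using hple)] at hf
      have hq : q = p := by injection hf with h; exact h.symm
      subst hq
      have hpG : q.1 = pvMin (q :: t) m := by
        have := pvMin_le_mem (q :: t) m (List.mem_cons_self (a := q))
        omega
      have hfire : q.1 < m := by omega
      simp only [List.foldl_cons, pvStep, if_pos hfire]
      rw [pvStep_nofire t q.1 q.2 (fun r hr => by
        have := pvMin_le_mem (q :: t) m (List.mem_cons_of_mem _ hr)
        omega)]
    · -- p not found; G is attained in t
      rw [List.find?_cons_of_neg (by simpa using hple)] at hf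
      have hG' : pvMin t (min m p.1) < min m p.1 := by
        rcases pvMin_attained t (min m p.1) with h | ⟨r, hr, h⟩
        · rw [hmin] at hple hG; omega
        · have h2 := pvMin_le_init t (min m p.1)
          rw [hmin] at hple; omega
      simp only [List.foldl_cons, pvStep]
      by_cases hfire : p.1 < m
      · have hmp : min m p.1 = p.1 := min_eq_right (le_of_lt hfire)
        have heq : pvMin (p :: t) m = pvMin t p.1 := by rw [hmin, hmp]
        rw [heq] at hf
        rw [if_pos hfire]
        exact ih p.1 p.2 (by rw [← hmp]; exact hG') hf
      · have hmp : min m p.1 = m := min_eq_left (not_lt.1 hfire)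
        have heq : pvMin (p :: t) m = pvMin t m := by rw [hmin, hmp]
        rw [heq] at hf
        rw [if_neg hfire]
        exact ih m v (by rw [← hmp]; exact hG') hf

-- set-state version of pvStep, as A's loop body performs it
def pvStepSet (s : Int × PySem.Set Int) (p : Int × Int) : Int × PySem.Set Int :=
  if p.1 < s.1 then (p.1, PySem.Set.add (s.2.drop 1) p.2) else s

theorem fold_pair_set (ps : List (Int × Int)) (m v : Int) :
    ps.foldl pvStepSet (m, PySem.Set.ofList [v])
      = ((ps.foldl pvStep (m, v)).1, PySem.Set.ofList [(ps.foldl pvStep (m, v)).2]) := by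
  induction ps generalizing m v with
  | nil => rfl
  | cons p t ih =>
    simp only [List.foldl_cons, pvStepSet, pvStep]
    by_cases h : p.1 < m
    · rw [if_pos h, if_pos h]
      have hsing : ∀ w : Int, PySem.Set.ofList [w] = [w] := by
        intro w; simp [PySem.Set.ofList, PySem.Set.add, PySem.Set.empty, PySem.Set.contains]
      have : PySem.Set.add (((m, PySem.Set.ofList [v]) : Int × PySem.Set Int).2.drop 1) p.2
          = PySem.Set.ofList [p.2] := by
        simp [hsing, PySem.Set.add, PySem.Set.contains]
      rw [this]
      exact ih p.1 p.2
    · rw [if_neg h, if_neg h]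
      exact ih m v

theorem blockA_fold {γ : Type} (l : List Int) (i : Int) (g : γ → Int × Int → γ) (init : γ) :
    (pvBlockA l i).foldl g init
      = (PySem.List.pyRange (i + 1) (PySem.List.len l) 1).foldl
          (fun st j => if pvGet l i = pvGet l j then g st (j - i, pvGet l i) else st) init := by
  unfold pvBlockA
  rw [List.foldl_filterMap]
  apply PySem.List.foldl_congr_mem
  intro acc x _
  by_cases h : pvGet l i = pvGet l x
  · simp [h]
  · simp [h]

theorem pairsA_fold {γ : Type} (l : List Int) (g : γ → Int × Int → γ) (init : γ) :
    (pvPairsA l).foldl g init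
      = (PySem.List.pyRange 0 (PySem.List.len l) 1).foldl
          (fun st i => (pvBlockA l i).foldl g st) init := by
  unfold pvPairsA
  rw [List.foldl_flatMap]

theorem portA_eq (l : List Int) :
    firstRepeatingEle l = [((pvPairsA l).foldl pvStep (10000000, 0)).2] := by
  unfold firstRepeatingEle
  have h1 : (pvPairsA l).foldl pvStepSet (10000000, PySem.Set.ofList [0])
      = (PySem.List.pyRange 0 (PySem.List.len l) 1).foldl (fun st i =>
          (PySem.List.pyRange (i + 1) (PySem.List.len l) 1).foldl (fun st j =>
            if PySem.List.pyGetD l i 0 = PySem.List.pyGetD l j 0 then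
              if j - i < st.1 then
                (j - i, PySem.Set.add (st.2.drop 1) (PySem.List.pyGetD l i 0))
              else st
            else st) st) ((10000000 : Int), (PySem.Set.ofList [(0 : Int)] : PySem.Set Int)) := by
    rw [pairsA_fold]
    apply PySem.List.foldl_congr_mem
    intro acc i _
    rw [blockA_fold]
    apply PySem.List.foldl_congr_mem
    intro acc2 j _
    simp only [pvGet, pvStepSet]
  rw [← h1, fold_pair_set]
  simp [PySem.Set.ofList, PySem.Set.add, PySem.Set.empty, PySem.Set.contains]

-- B's loop body, exactly as the port performs it
def pvBodyB (st : (Int × Int) × PySem.Dict Int Int) (p : Int × Int) :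
    (Int × Int) × PySem.Dict Int Int :=
  let st1 :=
    if st.2.contains p.2 && decide (p.1 - st.2.getD p.2 0 < st.1.1) then
      ((p.1 - st.2.getD p.2 0, p.2), st.2)
    else st
  (st1.1, st1.2.insert p.2 p.1)

theorem portB_fold (l : List Int) (k : Nat) :
    ∃ d : PySem.Dict Int Int,
      ((PySem.List.pyRange 0 (k : Int) 1).map (fun j => (j, pvGet l j))).foldl pvBodyB
          (((10000000 : Int), (0 : Int)), PySem.Dict.empty)
        = (((PySem.List.pyRange 0 (k : Int) 1).flatMap (pvBlockB l)).foldl pvStep (10000000, 0), d)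
      ∧ ∀ v : Int, d.get? v
          = ((PySem.List.pyRange 0 (k : Int) 1).filter (fun i => decide (pvGet l i = v))).getLast? := by
  induction k with
  | zero =>
    refine ⟨PySem.Dict.empty, by simp [PySem.List.pyRange], ?_⟩
    intro v
    simp [PySem.List.pyRange, PySem.Dict.get?, PySem.Dict.empty]
  | succ k ih =>
    obtain ⟨d, hfold, hget⟩ := ih
    have hcast : ((k + 1 : Nat) : Int) = (k : Int) + 1 := by push_cast; ring
    have hsplit : PySem.List.pyRange 0 ((k + 1 : Nat) : Int) 1
        = PySem.List.pyRange 0 (k : Int) 1 ++ [(k : Int)] := by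
      rw [hcast, PySem.List.pyRange_one_succ_right (by positivity)]
    have hprev : d.get? (pvGet l (k : Int)) = pvPrev l (k : Int) := by
      rw [hget]; rfl
    rw [hsplit, List.map_append, List.foldl_append, hfold, List.flatMap_append,
      List.foldl_append]
    cases hp : pvPrev l (k : Int) with
    | none =>
      have hcont : d.contains (pvGet l (k : Int)) = false := by
        rw [PySem.Dict.contains_eq_isSome_get?, hprev, hp]; rfl
      refine ⟨d.insert (pvGet l (k : Int)) (k : Int), ?_, ?_⟩
      · simp [pvBodyB, pvBlockB, hp, hcont]
      · intro v
        rw [List.filter_append, List.getLast?_append]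
        by_cases hv : v = pvGet l (k : Int)
        · subst hv
          rw [PySem.Dict.get?_insert_self]
          simp
        · rw [PySem.Dict.get?_insert_of_ne d _ hv, hget]
          simp only [List.filter_cons, List.filter_nil]
          have : (decide (pvGet l (k : Int) = v)) = false := by
            simp; exact fun h => hv h.symm
          simp [this]
    | some i =>
      have hcont : d.contains (pvGet l (k : Int)) = true := by
        rw [PySem.Dict.contains_eq_isSome_get?, hprev, hp]; rfl
      have hgD : d.getD (pvGet l (k : Int)) 0 = i := by
        rw [PySem.Dict.getD_eq_get?_getD, hprev, hp]; rfl
      refine ⟨d.insert (pvGet l (k : Int)) (k : Int), ?_, ?_⟩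
      · simp only [List.map_cons, List.map_nil, List.foldl_cons, List.foldl_nil, pvBodyB, hcont, hgD,
          Bool.true_and]
        by_cases hlt : (k : Int) - i < (((PySem.List.pyRange 0 (k : Int) 1).flatMap (pvBlockB l)).foldl pvStep (10000000, 0)).1
        · simp [pvBlockB, hp, pvStep, hlt]
        · simp [pvBlockB, hp, pvStep, hlt]
      · intro v
        rw [List.filter_append, List.getLast?_append]
        by_cases hv : v = pvGet l (k : Int)
        · subst hv
          rw [PySem.Dict.get?_insert_self]
          simp
        · rw [PySem.Dict.get?_insert_of_ne d _ hv, hget]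
          simp only [List.filter_cons, List.filter_nil]
          have : (decide (pvGet l (k : Int) = v)) = false := by
            simp; exact fun h => hv h.symm
          simp [this]

theorem portB_eq (l : List Int) :
    firstRepeatingEle_alt l = [((pvPairsB l).foldl pvStep (10000000, 0)).2] := by
  obtain ⟨d, hfold, -⟩ := portB_fold l l.length
  unfold firstRepeatingEle_alt
  have henum : PySem.List.enumerate l
      = (PySem.List.pyRange 0 ((l.length : Nat) : Int) 1).map (fun j => (j, pvGet l j)) := by
    rw [PySem.List.enumerate_eq_map_pyRange l 0, PySem.List.len_eq]
    rfl
  have hpairs : pvPairsB l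
      = (PySem.List.pyRange 0 ((l.length : Nat) : Int) 1).flatMap (pvBlockB l) := by
    unfold pvPairsB; rw [PySem.List.len_eq]
  rw [henum, hpairs]
  change PySem.Set.add PySem.Set.empty
      ((((PySem.List.pyRange 0 ((l.length : Nat) : Int) 1).map (fun j => (j, pvGet l j))).foldl
        pvBodyB (((10000000 : Int), (0 : Int)), PySem.Dict.empty)).1.2) = _
  rw [hfold]
  simp [PySem.Set.add, PySem.Set.empty, PySem.Set.contains]

theorem pairsA_mem {l : List Int} {p : Int × Int} (h : p ∈ pvPairsA l) :
    ∃ i j : Int, 0 ≤ i ∧ i < j ∧ j < PySem.List.len l ∧ pvGet l i = pvGet l j ∧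
      p = (j - i, pvGet l i) := by
  unfold pvPairsA pvBlockA at h
  obtain ⟨i, hi, hmem⟩ := List.mem_flatMap.1 h
  obtain ⟨j, hj, hpj⟩ := List.mem_filterMap.1 hmem
  rw [PySem.List.mem_pyRange_one] at hi hj
  by_cases hm : pvGet l i = pvGet l j
  · rw [if_pos hm] at hpj
    exact ⟨i, j, hi.1, by omega, hj.2, hm, (Option.some_inj.1 hpj).symm⟩
  · rw [if_neg hm] at hpj; cases hpj

theorem pairsA_mem_intro {l : List Int} {i j : Int} (h0 : 0 ≤ i) (hij : i < j)
    (hjn : j < PySem.List.len l) (hm : pvGet l i = pvGet l j) :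
    (j - i, pvGet l i) ∈ pvPairsA l := by
  unfold pvPairsA pvBlockA
  refine List.mem_flatMap.2 ⟨i, PySem.List.mem_pyRange_one.2 ⟨h0, by omega⟩, ?_⟩
  exact List.mem_filterMap.2 ⟨j, PySem.List.mem_pyRange_one.2 ⟨by omega, hjn⟩, by rw [if_pos hm]⟩

theorem pairwise_getLast_le : ∀ {L : List Int}, L.Pairwise (· < ·) →
    ∀ {a : Int}, L.getLast? = some a → ∀ x ∈ L, x ≤ a := by
  intro L
  induction L with
  | nil => intro _ a h; cases h
  | cons b t ih =>
    intro hpw a hlast x hx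
    cases t with
    | nil =>
      simp at hlast hx
      omega
    | cons c t' =>
      rw [List.getLast?_cons_cons] at hlast
      have hpw' := hpw.tail
      rcases List.mem_cons.1 hx with rfl | hx'
      · have ha : a ∈ c :: t' := List.mem_of_getLast? hlast
        have := (List.pairwise_cons.1 hpw).1 a ha
        omega
      · exact ih hpw' hlast x hx'

theorem pvPrev_mem {l : List Int} {j i : Int} (h : pvPrev l j = some i) :
    0 ≤ i ∧ i < j ∧ pvGet l i = pvGet l j := by
  unfold pvPrev at h
  have hm := List.mem_of_getLast? h
  have h1 := List.of_mem_filter hm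
  have h2 := List.mem_of_mem_filter hm
  rw [PySem.List.mem_pyRange_one] at h2
  exact ⟨h2.1, h2.2, by simpa using h1⟩

theorem pvPrev_max {l : List Int} {j i : Int} (h : pvPrev l j = some i) {i' : Int}
    (h0 : 0 ≤ i') (hij : i' < j) (hm : pvGet l i' = pvGet l j) : i' ≤ i := by
  unfold pvPrev at h
  have hpw : ((PySem.List.pyRange 0 j 1).filter
      (fun i => decide (pvGet l i = pvGet l j))).Pairwise (· < ·) :=
    List.Pairwise.filter _ (PySem.List.pairwise_lt_pyRange_one 0 j)
  exact pairwise_getLast_le hpw h i'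
    (List.mem_filter.2 ⟨PySem.List.mem_pyRange_one.2 ⟨h0, hij⟩, by simpa using hm⟩)

theorem pvPrev_some {l : List Int} {j i' : Int} (h0 : 0 ≤ i') (hij : i' < j)
    (hm : pvGet l i' = pvGet l j) : ∃ i, pvPrev l j = some i := by
  unfold pvPrev
  have hmem : i' ∈ (PySem.List.pyRange 0 j 1).filter (fun i => decide (pvGet l i = pvGet l j)) :=
    List.mem_filter.2 ⟨PySem.List.mem_pyRange_one.2 ⟨h0, hij⟩, by simpa using hm⟩
  cases hL : ((PySem.List.pyRange 0 j 1).filter (fun i => decide (pvGet l i = pvGet l j))).getLast? with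
  | none => rw [List.getLast?_eq_none_iff] at hL; rw [hL] at hmem; cases hmem
  | some a => exact ⟨a, rfl⟩

theorem pairsB_mem {l : List Int} {p : Int × Int} (h : p ∈ pvPairsB l) :
    ∃ j i : Int, 0 ≤ j ∧ j < PySem.List.len l ∧ pvPrev l j = some i ∧
      p = (j - i, pvGet l j) := by
  unfold pvPairsB at h
  obtain ⟨j, hj, hmem⟩ := List.mem_flatMap.1 h
  rw [PySem.List.mem_pyRange_one] at hj
  unfold pvBlockB at hmem
  cases hp : pvPrev l j with
  | none => rw [hp] at hmem; cases hmem
  | some i =>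
    rw [hp] at hmem
    simp at hmem
    exact ⟨j, i, hj.1, hj.2, hp, by rw [hmem]⟩

theorem pairsB_mem_intro {l : List Int} {j i : Int} (h0 : 0 ≤ j) (hn : j < PySem.List.len l)
    (hp : pvPrev l j = some i) : (j - i, pvGet l j) ∈ pvPairsB l := by
  unfold pvPairsB
  refine List.mem_flatMap.2 ⟨j, PySem.List.mem_pyRange_one.2 ⟨h0, hn⟩, ?_⟩
  unfold pvBlockB
  rw [hp]
  exact List.mem_singleton.2 rfl

-- every A-pair is (weakly) beaten by a B-pair: gaps' minima agree
theorem minB_eq_minA (l : List Int) :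
    pvMin (pvPairsB l) 10000000 = pvMin (pvPairsA l) 10000000 := by
  have hBA : ∀ p ∈ pvPairsB l, p ∈ pvPairsA l := by
    intro p hp
    obtain ⟨j, i, h0, hn, hprev, rfl⟩ := pairsB_mem hp
    obtain ⟨hi0, hij, hm⟩ := pvPrev_mem hprev
    have h2 := pairsA_mem_intro hi0 hij hn hm
    rwa [hm] at h2
  have hdom : ∀ p ∈ pvPairsA l, ∃ q ∈ pvPairsB l, q.1 ≤ p.1 := by
    intro p hp
    obtain ⟨i, j, h0, hij, hn, hm, rfl⟩ := pairsA_mem hp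
    obtain ⟨i', hprev⟩ := pvPrev_some h0 hij hm
    refine ⟨(j - i', pvGet l j), pairsB_mem_intro (by omega) hn hprev, ?_⟩
    have := pvPrev_max hprev h0 hij hm
    simp; omega
  apply le_antisymm
  · rcases pvMin_attained (pvPairsA l) 10000000 with h | ⟨p, hp, h⟩
    · rw [h]; exact pvMin_le_init _ _
    · obtain ⟨q, hq, hle⟩ := hdom p hp
      have := pvMin_le_mem (pvPairsB l) 10000000 hq
      omega
  · rcases pvMin_attained (pvPairsB l) 10000000 with h | ⟨q, hq, h⟩
    · rw [h]; exact pvMin_le_init _ _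
    · have := pvMin_le_mem (pvPairsA l) 10000000 (hBA q hq)
      omega

theorem blockA_mem {l : List Int} {i : Int} {a : Int × Int} (h : a ∈ pvBlockA l i) :
    ∃ j : Int, i < j ∧ j < PySem.List.len l ∧ pvGet l i = pvGet l j ∧ a = (j - i, pvGet l i) := by
  unfold pvBlockA at h
  obtain ⟨j, hj, hpj⟩ := List.mem_filterMap.1 h
  rw [PySem.List.mem_pyRange_one] at hj
  by_cases hm : pvGet l i = pvGet l j
  · rw [if_pos hm] at hpj
    exact ⟨j, by omega, hj.2, hm, (Option.some_inj.1 hpj).symm⟩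
  · rw [if_neg hm] at hpj; cases hpj

-- first A-pair with gap ≤ G sits at the least left index I realising the minimal gap G
theorem findA_eq (l : List Int) (G I : Int)
    (hG1 : 1 ≤ G) (hI0 : 0 ≤ I) (hJn : I + G < PySem.List.len l)
    (hmatch : pvGet l I = pvGet l (I + G))
    (hlb : ∀ p ∈ pvPairsA l, G ≤ p.1)
    (hleast : ∀ i : Int, 0 ≤ i → i < I → i + G < PySem.List.len l →
      pvGet l i ≠ pvGet l (i + G)) :
    (pvPairsA l).find? (fun p => decide (p.1 ≤ G)) = some (G, pvGet l I) := by
  have hIn : I < PySem.List.len l := by omega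
  unfold pvPairsA
  rw [PySem.List.pyRange_one_append 0 I (PySem.List.len l) hI0 (le_of_lt hIn),
    List.flatMap_append, List.find?_append]
  have h1 : (((PySem.List.pyRange 0 I 1).flatMap (pvBlockA l)).find?
      (fun p => decide (p.1 ≤ G))) = none := by
    rw [List.find?_eq_none]
    intro a ha
    obtain ⟨i, hi, hmem⟩ := List.mem_flatMap.1 ha
    rw [PySem.List.mem_pyRange_one] at hi
    obtain ⟨j, hij, hjn, hm, rfl⟩ := blockA_mem hmem
    have haA : (j - i, pvGet l i) ∈ pvPairsA l := pairsA_mem_intro hi.1 hij hjn hm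
    have hge := hlb _ haA
    simp only [decide_eq_true_eq, not_le]
    have hne : j ≠ i + G := by
      intro he
      exact hleast i hi.1 hi.2 (by omega) (by rw [← he]; exact hm)
    simp at hge
    omega
  rw [h1, Option.none_or]
  rw [PySem.List.pyRange_one_cons hIn, List.flatMap_cons, List.find?_append]
  have h2 : ((pvBlockA l I).find? (fun p => decide (p.1 ≤ G))) = some (G, pvGet l I) := by
    unfold pvBlockA
    rw [PySem.List.pyRange_one_append (I + 1) (I + G) (PySem.List.len l) (by omega) (by omega),
      List.filterMap_append, List.find?_append]
    have h21 : (((PySem.List.pyRange (I + 1) (I + G) 1).filterMap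
        (fun j => if pvGet l I = pvGet l j then some (j - I, pvGet l I) else none)).find?
          (fun p => decide (p.1 ≤ G))) = none := by
      rw [List.find?_eq_none]
      intro a ha
      obtain ⟨j, hj, hpj⟩ := List.mem_filterMap.1 ha
      rw [PySem.List.mem_pyRange_one] at hj
      by_cases hm : pvGet l I = pvGet l j
      · rw [if_pos hm] at hpj
        have := hlb _ (pairsA_mem_intro hI0 (by omega) (by omega) hm)
        rw [← (Option.some_inj.1 hpj)]
        simp only [decide_eq_true_eq, not_le]
        omega
      · rw [if_neg hm] at hpj; cases hpj
    rw [h21, Option.none_or]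
    rw [PySem.List.pyRange_one_cons (show I + G < PySem.List.len l from hJn),
      List.filterMap_cons]
    rw [if_pos hmatch]
    rw [List.find?_cons_of_pos (by simp)]
    congr 1
    rw [Prod.ext_iff]
    constructor
    · ring
    · rfl
  rw [h2]
  rfl

theorem blockB_mem {l : List Int} {j : Int} {a : Int × Int} (h : a ∈ pvBlockB l j) :
    ∃ i : Int, pvPrev l j = some i ∧ a = (j - i, pvGet l j) := by
  unfold pvBlockB at h
  cases hp : pvPrev l j with
  | none => rw [hp] at h; cases h
  | some i => rw [hp] at h; exact ⟨i, rfl, by simpa using h⟩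

theorem findB_eq (l : List Int) (G I : Int)
    (hG1 : 1 ≤ G) (hI0 : 0 ≤ I) (hJn : I + G < PySem.List.len l)
    (hmatch : pvGet l I = pvGet l (I + G))
    (hlbB : ∀ p ∈ pvPairsB l, G ≤ p.1)
    (hleast : ∀ i : Int, 0 ≤ i → i < I → i + G < PySem.List.len l →
      pvGet l i ≠ pvGet l (i + G)) :
    (pvPairsB l).find? (fun p => decide (p.1 ≤ G)) = some (G, pvGet l (I + G)) := by
  have hJn' : I + G ≤ PySem.List.len l := le_of_lt hJn
  unfold pvPairsB
  rw [PySem.List.pyRange_one_append 0 (I + G) (PySem.List.len l) (by omega) hJn',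
    List.flatMap_append, List.find?_append]
  have h1 : (((PySem.List.pyRange 0 (I + G) 1).flatMap (pvBlockB l)).find?
      (fun p => decide (p.1 ≤ G))) = none := by
    rw [List.find?_eq_none]
    intro a ha
    obtain ⟨j, hj, hmem⟩ := List.mem_flatMap.1 ha
    rw [PySem.List.mem_pyRange_one] at hj
    obtain ⟨i, hprev, rfl⟩ := blockB_mem hmem
    obtain ⟨hi0, hij, hm⟩ := pvPrev_mem hprev
    have haB : (j - i, pvGet l j) ∈ pvPairsB l :=
      pairsB_mem_intro hj.1 (by omega) hprev
    have hge := hlbB _ haB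
    simp only [decide_eq_true_eq, not_le]
    have hne : i ≠ j - G := by
      intro he
      refine hleast (j - G) (by omega) (by omega) (by omega) ?_
      rw [show j - G + G = j by ring, ← he]
      exact hm
    simp at hge
    omega
  rw [h1, Option.none_or]
  rw [PySem.List.pyRange_one_cons (show I + G < PySem.List.len l from hJn),
    List.flatMap_cons, List.find?_append]
  have hprevJ : pvPrev l (I + G) = some I := by
    obtain ⟨i'', hp⟩ := pvPrev_some hI0 (by omega) hmatch
    obtain ⟨h0'', hlt'', hm''⟩ := pvPrev_mem hp
    have hmax := pvPrev_max hp hI0 (by omega) hmatch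
    have hmem : ((I + G) - i'', pvGet l (I + G)) ∈ pvPairsB l :=
      pairsB_mem_intro (by omega) hJn hp
    have hge'' := hlbB _ hmem
    simp at hge''
    have hII : i'' = I := by omega
    rw [hII] at hp
    exact hp
  have h2 : ((pvBlockB l (I + G)).find? (fun p => decide (p.1 ≤ G)))
      = some (G, pvGet l (I + G)) := by
    unfold pvBlockB
    rw [hprevJ]
    rw [List.find?_cons_of_pos (by simp)]
    congr 1
    rw [Prod.ext_iff]
    constructor
    · ring
    · rfl
  rw [h2]
  rfl

-- ---- the two folds agree ----
theorem pairs_core (l : List Int) :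
    ((pvPairsA l).foldl pvStep (10000000, 0)).2
      = ((pvPairsB l).foldl pvStep (10000000, 0)).2 := by
  have hmineq := minB_eq_minA l
  by_cases hfire : pvMin (pvPairsA l) 10000000 < 10000000
  · -- some pair fires: both folds end at the earliest minimal-gap pair
    set G := pvMin (pvPairsA l) 10000000 with hGdef
    rcases pvMin_attained (pvPairsA l) 10000000 with h | ⟨p0, hp0, hGp⟩
    · omega
    obtain ⟨i0, j0, h00, h0ij, h0n, h0m, hp0eq⟩ := pairsA_mem hp0
    have hGval : G = j0 - i0 := by rw [hGdef, hGp, hp0eq]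
    have hG1 : 1 ≤ G := by omega
    have hPex : ∃ i : Nat, ((i : Int) + G < PySem.List.len l) ∧
        pvGet l (i : Int) = pvGet l ((i : Int) + G) := by
      refine ⟨i0.toNat, ?_, ?_⟩
      · rw [Int.toNat_of_nonneg h00]; omega
      · rw [Int.toNat_of_nonneg h00, show i0 + G = j0 by omega]; exact h0m
    have hstar := Nat.find_spec hPex
    have hleast : ∀ i : Int, 0 ≤ i → i < ((Nat.find hPex : Nat) : Int) →
        i + G < PySem.List.len l → pvGet l i ≠ pvGet l (i + G) := by
      intro i h0 hlt hn hm
      have hnat : i.toNat < Nat.find hPex := by omega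
      exact Nat.find_min hPex hnat ⟨by rw [Int.toNat_of_nonneg h0]; omega,
        by rw [Int.toNat_of_nonneg h0]; exact hm⟩
    set I : Int := ((Nat.find hPex : Nat) : Int) with hIdef
    have hI0 : (0 : Int) ≤ I := by positivity
    have hlb : ∀ p ∈ pvPairsA l, G ≤ p.1 := fun p hp => pvMin_le_mem _ _ hp
    have hlbB : ∀ p ∈ pvPairsB l, G ≤ p.1 := by
      intro p hp
      have := pvMin_le_mem (pvPairsB l) 10000000 hp
      omega
    have hfA := findA_eq l G I hG1 hI0 hstar.1 hstar.2 hlb hleast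
    have hfB := findB_eq l G I hG1 hI0 hstar.1 hstar.2 hlbB hleast
    rw [pvStep_snd_char (pvPairsA l) 10000000 0 _ hfire hfA,
      pvStep_snd_char (pvPairsB l) 10000000 0 _ (by rw [hmineq]; exact hfire)
        (by rw [hmineq]; exact hfB)]
    exact hstar.2
  · -- no pair ever fires: both folds keep the initial state
    have hA : ∀ p ∈ pvPairsA l, (10000000 : Int) ≤ p.1 := by
      intro p hp
      have := pvMin_le_mem (pvPairsA l) 10000000 hp
      omega
    have hB : ∀ p ∈ pvPairsB l, (10000000 : Int) ≤ p.1 := by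
      intro p hp
      have h1 := pvMin_le_mem (pvPairsB l) 10000000 hp
      omega
    rw [pvStep_nofire _ _ _ hA, pvStep_nofire _ _ _ hB]

-- ===== VERDICT (by name: the statement is the Claim_ definition above) =====
theorem firstRepeatingEle_spec : Claim_equal_firstRepeatingEle := by
  intro numList _
  unfold Spec_firstRepeatingEle
  rw [portA_eq, portB_eq, pairs_core]
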